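-- pv_equiv track=rewrite | github.com/ahmedryasser/Leetcode | 3787-maximum-students-on-a-single-bench/3787-maximum-students-on-a-single-bench.py | maxStudentsOnBench
-- ===== SOURCE A (Python) =====
-- from typing import List
--
-- from collections import defaultdict
--
-- def maxStudentsOnBench(students: List[List[int]]) -> int:
--     values = defaultdict(set)
--     for student,bench in students:
--         values[bench].add(student)
--
--     highest = 0
--     for count in values.values():
--         highest = max(highest,len(count))
--     return highest
-- ===== SOURCE B (Python) =====
-- from typing import List
--
-- def maxStudentsOnBench(students: List[List[int]]) -> int:
--     best = 0
--     for _s, b in students: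
--         distinct = {s2 for s2, b2 in students if b2 == b}
--         best = max(best, len(distinct))
--     return best
-- ===== Notes on version B (the rewrite author's own statement) =====
-- stated objective: alternative
-- what changed: B drops the dictionary/grouping entirely and brute-forces: for each input row it recomputes the set of distinct students sitting on that row's bench and keeps a running maximum, trading A's single grouping pass for a quadratic nested scan with no auxiliary mapping.
import Mathlib
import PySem

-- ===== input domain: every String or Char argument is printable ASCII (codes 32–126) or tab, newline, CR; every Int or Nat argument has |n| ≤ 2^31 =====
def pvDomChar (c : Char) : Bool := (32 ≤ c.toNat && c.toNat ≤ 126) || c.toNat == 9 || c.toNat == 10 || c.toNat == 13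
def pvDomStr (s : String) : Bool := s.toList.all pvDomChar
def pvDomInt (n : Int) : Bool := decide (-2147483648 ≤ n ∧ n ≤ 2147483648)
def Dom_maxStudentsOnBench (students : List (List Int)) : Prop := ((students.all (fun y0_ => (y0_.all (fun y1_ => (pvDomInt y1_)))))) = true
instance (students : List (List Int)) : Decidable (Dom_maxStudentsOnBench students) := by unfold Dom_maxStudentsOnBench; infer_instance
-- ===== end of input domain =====

-- B replaces A's dictionary of per-bench sets by a brute-force nested scan: for every row it
-- recomputes the distinct students on that row's bench and keeps a running maximum.

-- destructuring helpers for a two-element row [student, bench] (rows are length 2 under Pre_)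
def pvStudent (row : List Int) : Int :=
  match row with
  | [student, _] => student
  | _ => 0

def pvBench (row : List Int) : Int :=
  match row with
  | [_, bench] => bench
  | _ => 0

-- ===== PORT A =====
def maxStudentsOnBench (students : List (List Int)) : Int :=
  let values : PySem.Dict Int (PySem.Set Int) :=
    students.foldl (fun d row =>
      match row with
      | [student, bench] => d.insert bench (PySem.Set.add (d.getD bench PySem.Set.empty) student)
      | _ => d) PySem.Dict.empty
  values.values.foldl (fun highest count => max highest (PySem.Set.len count)) 0

-- ===== PORT B =====
def maxStudentsOnBench_alt (students : List (List Int)) : Int :=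
  students.foldl (fun best row =>
    match row with
    | [_, b] =>
        -- {s2 for s2, b2 in students if b2 == b}
        let distinct : PySem.Set Int :=
          PySem.Set.ofList ((students.filter (fun r2 => pvBench r2 == b)).map pvStudent)
        max best (PySem.Set.len distinct)
    | _ => best) 0

-- ===== PRECONDITION & SPEC =====
-- Pre_ excludes rows that are not exactly [student, bench]: Python A raises ValueError unpacking them (and B likewise).
def Pre_maxStudentsOnBench (students : List (List Int)) : Prop :=
  ∀ row ∈ students, row.length = 2
instance (students : List (List Int)) : Decidable (Pre_maxStudentsOnBench students) := by
  unfold Pre_maxStudentsOnBench; infer_instance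

def pvWitness_maxStudentsOnBench : List (List Int) := [[1, 2], [3, 2], [1, 2], [4, 7]]

def Spec_maxStudentsOnBench (students : List (List Int)) (out : Int) : Prop := out = maxStudentsOnBench_alt students
instance (students : List (List Int)) (out : Int) : Decidable (Spec_maxStudentsOnBench students out) := by unfold Spec_maxStudentsOnBench; infer_instance

-- ===== CLAIM (what is proved, stated in full; the proofs are below) =====
def Claim_equal_maxStudentsOnBench : Prop := ∀ (students : List (List Int)), Dom_maxStudentsOnBench students → Pre_maxStudentsOnBench students → Spec_maxStudentsOnBench students (maxStudentsOnBench students)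

-- ===== LEMMAS AND PROOFS =====

lemma ofList_append_singleton {α : Type} [BEq α] (l : List α) (x : α) :
    PySem.Set.ofList (l ++ [x]) = PySem.Set.add (PySem.Set.ofList l) x := by
  simp [PySem.Set.ofList_eq_foldl, List.foldl_append]

-- the per-bench set A's dictionary holds, characterized over the whole input
lemma getD_foldA (students : List (List Int)) (b : Int) :
    (students.foldl
        (fun d r => d.insert (pvBench r) (PySem.Set.add (d.getD (pvBench r) PySem.Set.empty) (pvStudent r)))
        PySem.Dict.empty).getD b PySem.Set.empty
      = PySem.Set.ofList (((students.filter (fun r => pvBench r == b)).map pvStudent)) := by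
  induction students using List.reverseRecOn with
  | nil => simp [PySem.Set.ofList, PySem.Dict.getD_empty, PySem.Set.empty]
  | append_singleton l r ih =>
    rw [List.foldl_append, List.foldl_cons, List.foldl_nil, PySem.Dict.getD_insert]
    by_cases hb : b = pvBench r
    · rw [if_pos hb, ← hb, ih]
      have hbe : (pvBench r == b) = true := by simp [hb]
      simp [hbe, ofList_append_singleton]
    · rw [if_neg hb, ih]
      have hbe : ¬ (pvBench r = b) := fun h => hb h.symm
      simp [List.filter_append, hbe]

lemma le_foldl_max (l : List Int) (a : Int) : a ≤ l.foldl max a := by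
  induction l generalizing a with
  | nil => simp
  | cons x t ih => exact le_trans (le_max_left a x) (ih (max a x))

lemma mem_le_foldl_max (l : List Int) (a x : Int) (hx : x ∈ l) : x ≤ l.foldl max a := by
  induction l generalizing a with
  | nil => cases hx
  | cons y t ih =>
    rcases List.mem_cons.mp hx with rfl | h
    · exact le_trans (le_max_right a x) (le_foldl_max t (max a x))
    · exact ih (a := max a y) h

lemma foldl_max_mem (l : List Int) (a : Int) : l.foldl max a = a ∨ l.foldl max a ∈ l := by
  induction l generalizing a with
  | nil => exact Or.inl rfl
  | cons x t ih =>
    rcases ih (max a x) with h | h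
    · rcases max_cases a x with ⟨he, _⟩ | ⟨he, _⟩
      · exact Or.inl (by rw [List.foldl_cons, h, he])
      · exact Or.inr (by rw [List.foldl_cons, h, he]; exact List.mem_cons_self ..)
    · exact Or.inr (List.mem_cons_of_mem _ h)

-- running max over 0 depends only on which values occur
lemma foldl_max_eq_of_mem_iff (l1 l2 : List Int) (h : ∀ x, x ∈ l1 ↔ x ∈ l2) :
    l1.foldl max 0 = l2.foldl max 0 := by
  have key : ∀ (u v : List Int), (∀ x, x ∈ u ↔ x ∈ v) → u.foldl max 0 ≤ v.foldl max 0 := by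
    intro u v huv
    rcases foldl_max_mem u 0 with he | hm
    · rw [he]; exact le_foldl_max v 0
    · exact mem_le_foldl_max v 0 _ ((huv _).mp hm)
  exact le_antisymm (key l1 l2 h) (key l2 l1 fun x => (h x).symm)

-- ===== VERDICT (by name: the statement is the Claim_ definition above) =====
theorem maxStudentsOnBench_spec : Claim_equal_maxStudentsOnBench := by
  intro students _ hpre
  unfold Spec_maxStudentsOnBench
  have hshape : ∀ r ∈ students, ∃ s b, r = [s, b] := by
    intro r hr
    have hl := hpre r hr
    match r, hl with
    | [s, b], _ => exact ⟨s, b, rfl⟩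
  -- the per-bench distinct-student count
  set cnt : Int → Int := fun k =>
    PySem.Set.len (PySem.Set.ofList ((students.filter (fun r => pvBench r == k)).map pvStudent))
    with hcnt
  -- characterize A: running max of cnt over the distinct benches
  have hA : maxStudentsOnBench students =
      ((PySem.Set.ofList (students.map pvBench)).map cnt).foldl max 0 := by
    simp only [maxStudentsOnBench]
    have hstep : ∀ (d : PySem.Dict Int (PySem.Set Int)), ∀ r ∈ students,
        (match r with
         | [student, bench] => d.insert bench (PySem.Set.add (d.getD bench PySem.Set.empty) student)
         | _ => d)
        = d.insert (pvBench r) (PySem.Set.add (d.getD (pvBench r) PySem.Set.empty) (pvStudent r)) := by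
      intro d r hr
      rcases hshape r hr with ⟨s, b, rfl⟩
      rfl
    rw [PySem.List.foldl_congr_mem students _ _ PySem.Dict.empty hstep]
    have hnodup := PySem.Dict.nodup_keys_foldl_insert_key students pvBench
      (fun d r => PySem.Set.add (d.getD (pvBench r) PySem.Set.empty) (pvStudent r))
      PySem.Dict.empty PySem.Dict.nodup_keys_empty
    have hkeys := PySem.Dict.keys_foldl_insert_key students pvBench
      (fun d r => PySem.Set.add (d.getD (pvBench r) PySem.Set.empty) (pvStudent r))
      PySem.Dict.empty
    rw [PySem.Dict.keys_empty, PySem.Set.update_nil_left] at hkeys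
    rw [PySem.Dict.values_eq_map_keys _ hnodup PySem.Set.empty, hkeys, List.foldl_map,
        List.foldl_map]
    refine PySem.List.foldl_congr_mem _ _ _ 0 (fun acc k _ => ?_)
    rw [getD_foldA, hcnt]
  -- characterize B: running max of cnt over each row's bench
  have hB : maxStudentsOnBench_alt students =
      ((students.map pvBench).map cnt).foldl max 0 := by
    simp only [maxStudentsOnBench_alt]
    have hstep : ∀ (best : Int), ∀ r ∈ students,
        (match r with
         | [_, b] =>
             let distinct : PySem.Set Int :=
               PySem.Set.ofList ((students.filter (fun r2 => pvBench r2 == b)).map pvStudent)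
             max best (PySem.Set.len distinct)
         | _ => best)
        = max best (cnt (pvBench r)) := by
      intro best r hr
      rcases hshape r hr with ⟨s, b, rfl⟩
      rfl
    rw [PySem.List.foldl_congr_mem students _ _ 0 hstep, List.map_map, List.foldl_map]
    rfl
  rw [hA, hB]
  refine foldl_max_eq_of_mem_iff _ _ (fun x => ?_)
  constructor
  · intro hx
    rcases List.mem_map.mp hx with ⟨k, hk, rfl⟩
    exact List.mem_map_of_mem ((PySem.Set.mem_ofList _ _).mp hk)
  · intro hx
    rcases List.mem_map.mp hx with ⟨k, hk, rfl⟩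
    exact List.mem_map_of_mem ((PySem.Set.mem_ofList _ _).mpr hk)
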